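-- pv_equiv track=rewrite | github.com/1ssong2024/Othello-bot | othello7.py | diagonalSets
-- ===== SOURCE A (Python) =====
-- def diagonalSets(pos):
--     listDiag = []
--     upperLeftRow = pos//8-pos%8
--     upperLeftBound = upperLeftRow*8
--     if upperLeftBound < 0: upperLeftBound = 0
--     upperleft = [i for i in range(pos-9, upperLeftBound-1, -9)] #OK
--
--     lowerLeftRow = pos//8+pos%8
--     lowerLeftBound = lowerLeftRow*8
--     if lowerLeftBound > 63: lowerLeftBound = 63
--     lowerleft = [i for i in range(pos+7, lowerLeftBound + 1, 7)] #OK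
--
--     upperRightRow = pos//8-(7-pos)%8
--     upperRightBound = upperRightRow*8
--     if upperRightBound < 0: upperRightBound = 0
--     upperright = [i for i in range(pos-7, upperRightBound, -7)]
--
--     lowerRightRow = pos//8+(7-pos)%8
--     lowerRightBound = lowerRightRow*8+9
--     if lowerRightBound > 63: lowerRightBound = 63
--     lowerright = [i for i in range(pos+9, lowerRightBound +1, 9)] #OK
--
--     if upperleft: listDiag.append(upperleft)
--     if lowerleft: listDiag.append(lowerleft)
--     if upperright: listDiag.append(upperright)
--     if lowerright: listDiag.append(lowerright)
--     return listDiag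
-- ===== SOURCE B (Python) =====
-- def diagonalSets(pos):
--     # Walk each diagonal cell by cell, stopping at the edge the walk moves toward:
--     # index 0 going up / index 63 going down, column 0 going left / column 7 going right.
--     col = pos % 8
--     out = []
--     for di, dc in ((-9, -1), (7, -1), (-7, 1), (9, 1)):
--         seg, i, c = [], pos + di, col + dc
--         while (i >= 0 if di < 0 else i <= 63) and (c >= 0 if dc < 0 else c <= 7):
--             seg.append(i)
--             i += di
--             c += dc
--         if seg:
--             out.append(seg)
--     return out
-- ===== Notes on version B (the rewrite author's own statement) =====
-- stated objective: alternative
-- what changed: B replaces A's four closed-form clamped row-bound computations and range() comprehensions by a single loop over the four diagonal step vectors that walks each diagonal cell by cell, stopping when the index or the tracked column crosses the board edge the walk moves toward.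
import Mathlib
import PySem

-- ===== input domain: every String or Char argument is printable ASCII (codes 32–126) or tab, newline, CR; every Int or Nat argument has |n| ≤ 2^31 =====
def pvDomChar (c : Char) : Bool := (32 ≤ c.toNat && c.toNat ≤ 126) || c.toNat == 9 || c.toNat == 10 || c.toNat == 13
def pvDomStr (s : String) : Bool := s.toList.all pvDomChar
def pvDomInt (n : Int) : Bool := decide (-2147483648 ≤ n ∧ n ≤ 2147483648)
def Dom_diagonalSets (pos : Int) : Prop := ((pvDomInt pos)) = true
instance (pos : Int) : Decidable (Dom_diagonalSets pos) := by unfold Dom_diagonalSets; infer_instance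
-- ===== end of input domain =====

-- B replaces A's closed-form clamped row-bound arithmetic and ranges by a per-cell walk along
-- each diagonal, checked against the board edge the walk moves toward (alternative, same cost).

-- ===== PORT A =====
def diagonalSets (pos : Int) : List (List Int) :=
  let listDiag : List (List Int) := []
  let upperLeftRow := PySem.Int.floordiv pos 8 - PySem.Int.mod pos 8
  let upperLeftBound := upperLeftRow * 8
  let upperLeftBound := if upperLeftBound < 0 then 0 else upperLeftBound
  let upperleft := PySem.List.pyRange (pos - 9) (upperLeftBound - 1) (-9)
  let lowerLeftRow := PySem.Int.floordiv pos 8 + PySem.Int.mod pos 8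
  let lowerLeftBound := lowerLeftRow * 8
  let lowerLeftBound := if lowerLeftBound > 63 then 63 else lowerLeftBound
  let lowerleft := PySem.List.pyRange (pos + 7) (lowerLeftBound + 1) 7
  let upperRightRow := PySem.Int.floordiv pos 8 - PySem.Int.mod (7 - pos) 8
  let upperRightBound := upperRightRow * 8
  let upperRightBound := if upperRightBound < 0 then 0 else upperRightBound
  let upperright := PySem.List.pyRange (pos - 7) upperRightBound (-7)
  let lowerRightRow := PySem.Int.floordiv pos 8 + PySem.Int.mod (7 - pos) 8
  let lowerRightBound := lowerRightRow * 8 + 9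
  let lowerRightBound := if lowerRightBound > 63 then 63 else lowerRightBound
  let lowerright := PySem.List.pyRange (pos + 9) (lowerRightBound + 1) 9
  let listDiag := if upperleft ≠ [] then listDiag ++ [upperleft] else listDiag
  let listDiag := if lowerleft ≠ [] then listDiag ++ [lowerleft] else listDiag
  let listDiag := if upperright ≠ [] then listDiag ++ [upperright] else listDiag
  let listDiag := if lowerright ≠ [] then listDiag ++ [lowerright] else listDiag
  listDiag

-- ===== PORT B =====
-- the while-loop of Source B; the fuel only makes it total (the column check stops every walk
-- within 8 steps, proved in pvWalk_eq's side conditions below)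
def pvWalk (di dc : Int) : Int → Int → Nat → List Int
  | _, _, 0 => []
  | i, c, fuel + 1 =>
    if (if di < 0 then 0 ≤ i else i ≤ 63) ∧ (if dc < 0 then 0 ≤ c else c ≤ 7) then
      i :: pvWalk di dc (i + di) (c + dc) fuel
    else []

def diagonalSets_alt (pos : Int) : List (List Int) :=
  let col := PySem.Int.mod pos 8
  let dirs : List (Int × Int) := [(-9, -1), (7, -1), (-7, 1), (9, 1)]
  dirs.foldl (fun out d =>
    let seg := pvWalk d.1 d.2 (pos + d.1) (col + d.2) 9
    if seg ≠ [] then out ++ [seg] else out) []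

-- ===== PRECONDITION & SPEC =====
def Spec_diagonalSets (pos : Int) (out : List (List Int)) : Prop := out = diagonalSets_alt pos
instance (pos : Int) (out : List (List Int)) : Decidable (Spec_diagonalSets pos out) := by unfold Spec_diagonalSets; infer_instance

-- ===== CLAIM (what is proved, stated in full; the proofs are below) =====
def Claim_equal_diagonalSets : Prop := ∀ (pos : Int), Dom_diagonalSets pos → Spec_diagonalSets pos (diagonalSets pos)

-- ===== LEMMAS AND PROOFS =====

theorem pvWalk_eq (di dc i c : Int) (n fuel : Nat) (hf : n ≤ fuel)
    (hcont : ∀ k : Nat, k < n →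
      ((if di < 0 then 0 ≤ i + di * (k : Int) else i + di * (k : Int) ≤ 63) ∧
       (if dc < 0 then 0 ≤ c + dc * (k : Int) else c + dc * (k : Int) ≤ 7)))
    (hstop : ¬ ((if di < 0 then 0 ≤ i + di * (n : Int) else i + di * (n : Int) ≤ 63) ∧
                (if dc < 0 then 0 ≤ c + dc * (n : Int) else c + dc * (n : Int) ≤ 7))) :
    pvWalk di dc i c fuel = (List.range n).map (fun (k : Nat) => i + di * (k : Int)) := by
  induction n generalizing i c fuel with
  | zero =>
    have h0 : ¬ ((if di < 0 then 0 ≤ i else i ≤ 63) ∧ (if dc < 0 then 0 ≤ c else c ≤ 7)) := by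
      simpa using hstop
    cases fuel with
    | zero => simp [pvWalk]
    | succ f => simp [pvWalk, h0]
  | succ n ih =>
    cases fuel with
    | zero => omega
    | succ f =>
      have h0 := hcont 0 (Nat.succ_pos n)
      simp only [Nat.cast_zero, mul_zero, add_zero] at h0
      have hrec : pvWalk di dc (i + di) (c + dc) f
          = (List.range n).map (fun (k : Nat) => (i + di) + di * (k : Int)) := by
        refine ih (i + di) (c + dc) f (by omega) ?_ ?_
        · intro k hk
          have h := hcont (k + 1) (by omega)
          have e1 : i + di * ((k + 1 : Nat) : Int) = (i + di) + di * (k : Int) := by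
            push_cast; ring
          have e2 : c + dc * ((k + 1 : Nat) : Int) = (c + dc) + dc * (k : Int) := by
            push_cast; ring
          rw [e1, e2] at h
          exact h
        · have e1 : i + di * ((n + 1 : Nat) : Int) = (i + di) + di * (n : Int) := by
            push_cast; ring
          have e2 : c + dc * ((n + 1 : Nat) : Int) = (c + dc) + dc * (n : Int) := by
            push_cast; ring
          rw [e1, e2] at hstop
          exact hstop
      simp only [pvWalk, if_pos h0, hrec, List.range_succ_eq_map, List.map_cons, List.map_map]
      congr 1
      · simp
      · refine List.map_congr_left (fun k _ => ?_)
        simp only [Function.comp_apply]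
        push_cast
        ring

theorem pv_ul (pos : Int) :
    PySem.List.pyRange (pos - 9)
      ((if (PySem.Int.floordiv pos 8 - PySem.Int.mod pos 8) * 8 < 0 then 0
        else (PySem.Int.floordiv pos 8 - PySem.Int.mod pos 8) * 8) - 1) (-9)
    = pvWalk (-9) (-1) (pos + -9) (PySem.Int.mod pos 8 + -1) 9 := by
  rw [PySem.List.pyRange_of_neg _ _ (by norm_num : (-9 : Int) < 0)]
  rw [PySem.Int.floordiv_eq_ediv_of_pos (by norm_num : (0:Int) < 8),
      PySem.Int.mod_eq_emod_of_pos (by norm_num : (0:Int) < 8)]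
  rw [pvWalk_eq (-9) (-1) (pos + -9) (pos % 8 + -1)
      (if (if (pos / 8 - pos % 8) * 8 < 0 then 0 else (pos / 8 - pos % 8) * 8) - 1 < pos - 9
       then ((pos - 9 - ((if (pos / 8 - pos % 8) * 8 < 0 then 0 else (pos / 8 - pos % 8) * 8) - 1) + 9 - 1) / 9).toNat
       else 0) 9
      (by split_ifs <;> omega)
      (by intro k hk; constructor <;> norm_num <;> split_ifs at hk ⊢ <;> omega)
      (by norm_num; split_ifs <;> omega)]
  refine List.map_congr_left (fun k _ => by ring)

theorem pv_ll (pos : Int) :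
    PySem.List.pyRange (pos + 7)
      ((if (PySem.Int.floordiv pos 8 + PySem.Int.mod pos 8) * 8 > 63 then 63
        else (PySem.Int.floordiv pos 8 + PySem.Int.mod pos 8) * 8) + 1) 7
    = pvWalk 7 (-1) (pos + 7) (PySem.Int.mod pos 8 + -1) 9 := by
  rw [PySem.List.pyRange_of_pos _ _ (by norm_num : (0 : Int) < 7)]
  rw [PySem.Int.floordiv_eq_ediv_of_pos (by norm_num : (0:Int) < 8),
      PySem.Int.mod_eq_emod_of_pos (by norm_num : (0:Int) < 8)]
  rw [pvWalk_eq 7 (-1) (pos + 7) (pos % 8 + -1)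
      (if pos + 7 < (if (pos / 8 + pos % 8) * 8 > 63 then 63 else (pos / 8 + pos % 8) * 8) + 1
       then (((if (pos / 8 + pos % 8) * 8 > 63 then 63 else (pos / 8 + pos % 8) * 8) + 1 - (pos + 7) + 7 - 1) / 7).toNat
       else 0) 9
      (by split_ifs <;> omega)
      (by intro k hk; constructor <;> norm_num <;> split_ifs at hk ⊢ <;> omega)
      (by norm_num; split_ifs <;> omega)]

theorem pv_ur (pos : Int) :
    PySem.List.pyRange (pos - 7)
      (if (PySem.Int.floordiv pos 8 - PySem.Int.mod (7 - pos) 8) * 8 < 0 then 0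
       else (PySem.Int.floordiv pos 8 - PySem.Int.mod (7 - pos) 8) * 8) (-7)
    = pvWalk (-7) 1 (pos + -7) (PySem.Int.mod pos 8 + 1) 9 := by
  rw [PySem.List.pyRange_of_neg _ _ (by norm_num : (-7 : Int) < 0)]
  rw [PySem.Int.floordiv_eq_ediv_of_pos (by norm_num : (0:Int) < 8),
      PySem.Int.mod_eq_emod_of_pos (a := pos) (by norm_num : (0:Int) < 8),
      PySem.Int.mod_eq_emod_of_pos (a := 7 - pos) (by norm_num : (0:Int) < 8)]
  rw [pvWalk_eq (-7) 1 (pos + -7) (pos % 8 + 1)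
      (if (if (pos / 8 - (7 - pos) % 8) * 8 < 0 then 0 else (pos / 8 - (7 - pos) % 8) * 8) < pos - 7
       then ((pos - 7 - (if (pos / 8 - (7 - pos) % 8) * 8 < 0 then 0 else (pos / 8 - (7 - pos) % 8) * 8) + 7 - 1) / 7).toNat
       else 0) 9
      (by split_ifs <;> omega)
      (by intro k hk; constructor <;> norm_num <;> split_ifs at hk ⊢ <;> omega)
      (by norm_num; split_ifs <;> omega)]
  refine List.map_congr_left (fun k _ => by ring)

theorem pv_lr (pos : Int) :
    PySem.List.pyRange (pos + 9)
      ((if (PySem.Int.floordiv pos 8 + PySem.Int.mod (7 - pos) 8) * 8 + 9 > 63 then 63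
        else (PySem.Int.floordiv pos 8 + PySem.Int.mod (7 - pos) 8) * 8 + 9) + 1) 9
    = pvWalk 9 1 (pos + 9) (PySem.Int.mod pos 8 + 1) 9 := by
  rw [PySem.List.pyRange_of_pos _ _ (by norm_num : (0 : Int) < 9)]
  rw [PySem.Int.floordiv_eq_ediv_of_pos (by norm_num : (0:Int) < 8),
      PySem.Int.mod_eq_emod_of_pos (a := pos) (by norm_num : (0:Int) < 8),
      PySem.Int.mod_eq_emod_of_pos (a := 7 - pos) (by norm_num : (0:Int) < 8)]
  rw [pvWalk_eq 9 1 (pos + 9) (pos % 8 + 1)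
      (if pos + 9 < (if (pos / 8 + (7 - pos) % 8) * 8 + 9 > 63 then 63 else (pos / 8 + (7 - pos) % 8) * 8 + 9) + 1
       then (((if (pos / 8 + (7 - pos) % 8) * 8 + 9 > 63 then 63 else (pos / 8 + (7 - pos) % 8) * 8 + 9) + 1 - (pos + 9) + 9 - 1) / 9).toNat
       else 0) 9
      (by split_ifs <;> omega)
      (by intro k hk; constructor <;> norm_num <;> split_ifs at hk ⊢ <;> omega)
      (by norm_num; split_ifs <;> omega)]

-- ===== VERDICT (by name: the statement is the Claim_ definition above) =====
theorem diagonalSets_spec : Claim_equal_diagonalSets := by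
  intro pos _
  unfold Spec_diagonalSets
  simp only [diagonalSets, diagonalSets_alt, List.foldl]
  rw [pv_ul pos, pv_ll pos, pv_ur pos, pv_lr pos]
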